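-- pv_equiv track=rewrite | github.com/HelloYeew/helloyeew-lab-computer-programming-ii | Lab2/Lab2/recursion_lab.py | replace_list
-- ===== SOURCE A (Python) =====
-- def replace_list(l):
--     """
--     Returns a new list that replaces the element that is less than 10 with 0 asumming `l` is a list of integers
--
--     Examples:
--         >>> replace_list([2, 4, 6, 7])
--         [0, 0, 0, 0]
--         >>> replace_list([2, 0, 20, 0, 2, 456, 90])
--         [0, 0, 20, 0, 0, 456, 90]
--         >>> sum(replace_list(range(101))) == 5050 - 45
--         True
--         >>> sum(replace_list(range(-10, 11)))
--         10
--         >>> replace_list([])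
--         []
--     """
--     if len(l) == 0:
--         return []
--     else:
--         f = l[0]
--         if l[0] < 10:
--             f = 0
--         return [f] + replace_list(l[1:])
-- ===== SOURCE B (Python) =====
-- def replace_list(l):
--     result = []
--     for x in l:
--         if x < 10:
--             result.append(0)
--         else:
--             result.append(x)
--     return result
-- ===== Notes on version B (the rewrite author's own statement) =====
-- stated objective: simpler
-- what changed: Replaced A's head/tail recursion with l[1:] slicing and list concatenation by a single forward loop appending into an accumulator list.
import Mathlib
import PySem

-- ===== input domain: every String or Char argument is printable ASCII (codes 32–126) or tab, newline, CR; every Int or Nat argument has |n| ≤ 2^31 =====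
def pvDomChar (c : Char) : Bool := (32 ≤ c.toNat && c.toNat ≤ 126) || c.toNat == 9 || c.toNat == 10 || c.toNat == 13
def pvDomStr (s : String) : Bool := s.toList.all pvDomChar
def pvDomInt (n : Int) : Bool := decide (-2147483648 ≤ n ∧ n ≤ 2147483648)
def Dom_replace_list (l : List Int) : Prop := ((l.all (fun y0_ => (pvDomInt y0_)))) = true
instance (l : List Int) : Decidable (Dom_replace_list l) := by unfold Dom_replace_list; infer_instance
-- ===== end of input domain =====

-- ===== PORT A =====
-- Head/tail recursion: l[0] checked against 10, l[1:] processed recursively, lists concatenated.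
def replace_list : List Int → List Int
  | [] => []
  | x :: rest =>
    let f := if x < 10 then 0 else x
    [f] ++ replace_list rest

-- ===== PORT B =====
-- B: one forward pass appending into an accumulator list (Source B's explicit loop).
def replace_list_alt (l : List Int) : List Int :=
  l.foldl (fun result x => result ++ [if x < 10 then 0 else x]) []

-- ===== PRECONDITION & SPEC =====
def Spec_replace_list (l : List Int) (out : List Int) : Prop := out = replace_list_alt l
instance (l : List Int) (out : List Int) : Decidable (Spec_replace_list l out) := by unfold Spec_replace_list; infer_instance

-- ===== CLAIM =====
def Claim_equal_replace_list : Prop := ∀ (l : List Int), Dom_replace_list l → Spec_replace_list l (replace_list l)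

-- ===== LEMMAS AND PROOFS =====
theorem foldl_acc (l : List Int) (acc : List Int) :
    l.foldl (fun result x => result ++ [if x < 10 then 0 else x]) acc = acc ++ replace_list l := by
  induction l generalizing acc with
  | nil => simp [replace_list]
  | cons x rest ih => simp [List.foldl, replace_list, ih]

-- ===== VERDICT =====
theorem replace_list_spec : Claim_equal_replace_list := by
  intro l _
  unfold Spec_replace_list replace_list_alt
  rw [foldl_acc]
  simp
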